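-- pv_equiv track=rewrite | github.com/trox667/aoc-vercel | api/solutions/day11.py | update_all
-- ===== SOURCE A (Python) =====
-- def update_all(energy_map):
--     flash = []
--     for y in range(len(energy_map)):
--         for x in range(len(energy_map[0])):
--             energy_map[y][x] += 1
--             if energy_map[y][x] > 9:
--                 flash.append((x, y))
--                 energy_map[y][x] = 0
--     return flash
-- ===== SOURCE B (Python) =====
-- def update_all(energy_map):
--     width = len(energy_map[0]) if energy_map else 0
--     flash = [(x, y)
--              for y, row in enumerate(energy_map)
--              for x in range(width)
--              if row[x] >= 9]
--     for row in energy_map: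
--         for x in range(width):
--             row[x] = 0 if row[x] >= 9 else row[x] + 1
--     return flash
-- ===== Notes on version B (the rewrite author's own statement) =====
-- stated objective: simpler
-- what changed: A interleaves increment, flash-test and reset in one nested loop threading the mutated grid; B collects the flash coordinates with a single flat comprehension over the original values (row[x] >= 9) and does the in-place reset/increment in a separate pass.
-- outside the precondition, e.g. on update_all([[1, 2], [3]]): A raises IndexError, B raises IndexError
import Mathlib
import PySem

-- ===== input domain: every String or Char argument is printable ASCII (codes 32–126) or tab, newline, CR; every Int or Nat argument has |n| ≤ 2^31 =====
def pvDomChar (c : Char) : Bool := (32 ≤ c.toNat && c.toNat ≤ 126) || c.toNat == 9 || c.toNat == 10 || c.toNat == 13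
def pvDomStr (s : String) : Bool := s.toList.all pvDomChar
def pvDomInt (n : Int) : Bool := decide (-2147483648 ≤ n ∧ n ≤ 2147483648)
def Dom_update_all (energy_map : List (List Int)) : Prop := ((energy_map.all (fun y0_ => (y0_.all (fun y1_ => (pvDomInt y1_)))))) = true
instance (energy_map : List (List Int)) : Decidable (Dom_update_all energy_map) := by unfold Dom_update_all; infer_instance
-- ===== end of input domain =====

-- B replaces A's single check-as-you-increment nested loop by a flat comprehension that collects
-- the flashing coordinates from the original values, followed by a separate reset/increment pass
-- (objective: simpler decomposition).  Both A and B mutate energy_map identically in Python; the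
-- Lean equivalence is about the RETURN value (the flash list) only.

-- ===== PORT A =====
-- inner loop body: energy_map[y][x] += 1; if > 9 then append and set 0.  The row is threaded as
-- local state (only row y is touched by the inner loop).  pyGet? none = IndexError (outside Pre_);
-- the state is returned unchanged there.
def innerStepA (y : Int) (st : List Int × List (Int × Int)) (x : Int) : List Int × List (Int × Int) :=
  match PySem.List.pyGet? st.1 x with
  | none => st
  | some v =>
    let row1 := PySem.List.pySetD st.1 x (v + 1)
    if v + 1 > 9 then (PySem.List.pySetD row1 x 0, st.2 ++ [(x, y)])
    else (row1, st.2)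

-- outer loop body: len(energy_map[0]) is re-read each iteration (grid nonempty whenever the loop
-- body runs, so the getD default [] is never used there).
def outerStepA (st : List (List Int) × List (Int × Int)) (y : Int) : List (List Int) × List (Int × Int) :=
  let w : Int := ((PySem.List.pyGetD st.1 0 ([] : List Int)).length : Int)
  match PySem.List.pyGet? st.1 y with
  | none => st
  | some row =>
    let p := (PySem.List.pyRange 0 w 1).foldl (innerStepA y) (row, st.2)
    (PySem.List.pySetD st.1 y p.1, p.2)

def update_all (energy_map : List (List Int)) : List (Int × Int) :=
  ((PySem.List.pyRange 0 (energy_map.length : Int) 1).foldl outerStepA (energy_map, [])).2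

-- ===== PORT B =====
-- transliteration of Source B's flash comprehension; row[x] is pyGetD row x 0, exact under Pre_
-- (0 ≤ x < width ≤ row.length).  Source B's second loop (the in-place reset/increment pass) does not
-- contribute to the return value and has no counterpart in a value-level port.
def update_all_alt (energy_map : List (List Int)) : List (Int × Int) :=
  let width : Int := match energy_map with | [] => 0 | r :: _ => (r.length : Int)
  (PySem.List.enumerate energy_map 0).flatMap (fun p =>
    (PySem.List.pyRange 0 width 1).filterMap (fun x =>
      if PySem.List.pyGetD p.2 x 0 ≥ 9 then some (x, p.1) else none))

-- ===== PRECONDITION & SPEC =====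
-- Pre_ excludes exactly the grids on which the Python A raises IndexError: some row is shorter
-- than the first row (A indexes every row up to len(energy_map[0])).
def Pre_update_all (energy_map : List (List Int)) : Prop :=
  ∀ row ∈ energy_map, (energy_map.head?.getD []).length ≤ row.length
instance (energy_map : List (List Int)) : Decidable (Pre_update_all energy_map) := by
  unfold Pre_update_all; infer_instance
def pvWitness_update_all : List (List Int) := [[9, 1], [5, 12]]

def Spec_update_all (energy_map : List (List Int)) (out : List (Int × Int)) : Prop := out = update_all_alt energy_map
instance (energy_map : List (List Int)) (out : List (Int × Int)) : Decidable (Spec_update_all energy_map out) := by unfold Spec_update_all; infer_instance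

-- ===== CLAIM (what is proved, stated in full; the proofs are below) =====
def Claim_equal_update_all : Prop := ∀ (energy_map : List (List Int)), Dom_update_all energy_map → Pre_update_all energy_map → Spec_update_all energy_map (update_all energy_map)

-- ===== LEMMAS AND PROOFS =====

-- the inner loop preserves the row length
theorem innerA_length (xs : List Int) (y : Int) (r : List Int) (acc : List (Int × Int)) :
    ((xs.foldl (innerStepA y) (r, acc)).1).length = r.length := by
  induction xs generalizing r acc with
  | nil => rfl
  | cons x xs ih =>
    simp only [List.foldl_cons, innerStepA]
    cases h : PySem.List.pyGet? r x with
    | none => exact ih r acc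
    | some v =>
      by_cases h9 : v + 1 > 9 <;> simp [h9, ih, PySem.List.length_pySetD]

-- the inner loop appends exactly the flashing x's of the (current) row, read off the row's
-- original values
theorem innerA_flash (n : ℕ) (a w y : Int) (r : List Int) (acc : List (Int × Int))
    (hn : a + n = w) (ha : 0 ≤ a) (hw : w ≤ (r.length : Int)) :
    ((PySem.List.pyRange a w 1).foldl (innerStepA y) (r, acc)).2
      = acc ++ (PySem.List.pyRange a w 1).filterMap
          (fun x => if PySem.List.pyGetD r x 0 ≥ 9 then some (x, y) else none) := by
  induction n generalizing a r acc with
  | zero =>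
    have : w ≤ a := by omega
    simp [PySem.List.pyRange_one_eq_nil this]
  | succ n ih =>
    have haw : a < w := by omega
    rw [PySem.List.pyRange_one_cons haw]
    have hlt : a < (r.length : Int) := by omega
    have hget : PySem.List.pyGet? r a = some r[a.toNat] :=
      PySem.List.pyGet?_eq_some_getElem r ha hlt
    have hgetD : PySem.List.pyGetD r a 0 = r[a.toNat] := by
      simp [PySem.List.pyGetD, hget]
    have hsetD : ∀ v : Int, PySem.List.pySetD r a v = r.set a.toNat v := fun v =>
      PySem.List.pySetD_of_nonneg r v ha
    have hcongr : ∀ (r' : List Int), r'.length = r.length →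
        (∀ x : Int, a < x → PySem.List.pyGetD r' x 0 = PySem.List.pyGetD r x 0) →
        ((PySem.List.pyRange (a+1) w 1).foldl (innerStepA y) (r', acc ++ (if r[a.toNat] ≥ 9 then [(a, y)] else []))).2
          = acc ++ (a :: PySem.List.pyRange (a+1) w 1).filterMap
              (fun x => if PySem.List.pyGetD r x 0 ≥ 9 then some (x, y) else none) := by
      intro r' hlen hagree
      rw [ih (a+1) r' _ (by omega) (by omega) (by rw [hlen]; omega)]
      rw [List.filterMap_cons]
      have : (PySem.List.pyRange (a+1) w 1).filterMap
            (fun x => if PySem.List.pyGetD r' x 0 ≥ 9 then some (x, y) else none)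
          = (PySem.List.pyRange (a+1) w 1).filterMap
            (fun x => if PySem.List.pyGetD r x 0 ≥ 9 then some (x, y) else none) := by
        apply List.filterMap_congr
        intro x hx
        have hx' := (PySem.List.mem_pyRange_one.mp hx).1
        rw [hagree x (by omega)]
      rw [this, hgetD]
      by_cases h9 : r[a.toNat] ≥ (9 : Int) <;> simp [h9]
    simp only [List.foldl_cons, innerStepA, hget]
    by_cases h9 : r[a.toNat] + 1 > 9
    · simp only [h9, if_pos]
      have h9' : r[a.toNat] ≥ (9 : Int) := by omega
      have := hcongr (PySem.List.pySetD (PySem.List.pySetD r a (r[a.toNat] + 1)) a 0)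
        (by simp [PySem.List.length_pySetD])
        (by
          intro x hx
          rw [hsetD, PySem.List.pySetD_of_nonneg _ _ ha, List.set_set]
          rw [PySem.List.pyGetD, PySem.List.pyGet?_of_nonneg _ (by omega : (0:Int) ≤ x),
            PySem.List.pyGetD, PySem.List.pyGet?_of_nonneg _ (by omega : (0:Int) ≤ x)]
          simp [List.getElem?_set_ne (by omega : a.toNat ≠ x.toNat)])
      simp only [h9', if_pos] at this
      simpa using this
    · simp only [h9, if_neg, not_false_iff]
      have h9' : ¬ r[a.toNat] ≥ (9 : Int) := by omega
      have := hcongr (PySem.List.pySetD r a (r[a.toNat] + 1))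
        (by simp [PySem.List.length_pySetD])
        (by
          intro x hx
          rw [hsetD]
          rw [PySem.List.pyGetD, PySem.List.pyGet?_of_nonneg _ (by omega : (0:Int) ≤ x),
            PySem.List.pyGetD, PySem.List.pyGet?_of_nonneg _ (by omega : (0:Int) ≤ x)]
          simp [List.getElem?_set_ne (by omega : a.toNat ≠ x.toNat)])
      simp only [h9', if_neg, not_false_iff] at this
      simpa using this

-- the flashes of one row, as a function of the grid
def rowFlashes (g : List (List Int)) (y : Int) : List (Int × Int) :=
  (PySem.List.pyRange 0 ((PySem.List.pyGetD g 0 ([] : List Int)).length : Int) 1).filterMap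
    (fun x => if PySem.List.pyGetD (PySem.List.pyGetD g y ([] : List Int)) x 0 ≥ 9 then some (x, y) else none)

-- the outer loop appends exactly the flashes of rows a, a+1, …, read off the (current) grid
theorem outerA_flash (n : ℕ) (a L : Int) (g : List (List Int)) (acc : List (Int × Int))
    (hn : a + n = (g.length : Int)) (hL : L = (g.length : Int)) (ha : 0 ≤ a)
    (hpre : ∀ row ∈ g, (PySem.List.pyGetD g 0 ([] : List Int)).length ≤ row.length) :
    ((PySem.List.pyRange a L 1).foldl outerStepA (g, acc)).2
      = acc ++ (PySem.List.pyRange a L 1).flatMap (rowFlashes g) := by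
  induction n generalizing a g acc with
  | zero =>
    have : L ≤ a := by omega
    simp [PySem.List.pyRange_one_eq_nil this]
  | succ n ih =>
    have haw : a < L := by omega
    rw [PySem.List.pyRange_one_cons haw]
    have hlt : a < (g.length : Int) := by omega
    have hget : PySem.List.pyGet? g a = some g[a.toNat] :=
      PySem.List.pyGet?_eq_some_getElem g ha hlt
    have hgetDg : PySem.List.pyGetD g a ([] : List Int) = g[a.toNat] := by
      simp [PySem.List.pyGetD, hget]
    have hmem : g[a.toNat] ∈ g := List.getElem_mem _
    have hwle : ((PySem.List.pyGetD g 0 ([] : List Int)).length : Int) ≤ (g[a.toNat].length : Int) := by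
      exact_mod_cast hpre _ hmem
    simp only [List.foldl_cons, outerStepA, hget]
    set w : Int := ((PySem.List.pyGetD g 0 ([] : List Int)).length : Int) with hw
    set p := (PySem.List.pyRange 0 w 1).foldl (innerStepA a) (g[a.toNat], acc) with hp
    have hflash : p.2 = acc ++ rowFlashes g a := by
      rw [hp, innerA_flash (PySem.List.pyGetD g 0 ([] : List Int)).length 0 w a _ _ (by omega)
        le_rfl hwle]
      rw [rowFlashes, hgetDg, hw]
    have hplen : p.1.length = g[a.toNat].length := innerA_length _ _ _ _
    set g' := PySem.List.pySetD g a p.1 with hg'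
    have hg'set : g' = g.set a.toNat p.1 := PySem.List.pySetD_of_nonneg g p.1 ha
    have hg'len : (g'.length : Int) = (g.length : Int) := by simp [hg'set]
    have hagree : ∀ x : Int, 0 ≤ x → x ≠ a →
        PySem.List.pyGetD g' x ([] : List Int) = PySem.List.pyGetD g x ([] : List Int) := by
      intro x hx0 hx
      rw [hg'set, PySem.List.pyGetD, PySem.List.pyGet?_of_nonneg _ (by omega : (0:Int) ≤ x),
        PySem.List.pyGetD, PySem.List.pyGet?_of_nonneg _ (by omega : (0:Int) ≤ x)]
      simp [List.getElem?_set_ne (by omega : a.toNat ≠ x.toNat)]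
    have hg'0 : (PySem.List.pyGetD g' 0 ([] : List Int)).length
        = (PySem.List.pyGetD g 0 ([] : List Int)).length := by
      by_cases h0 : a = 0
      · subst h0
        have h0lt : 0 < g.length := by omega
        simp [hg'set, PySem.List.pyGetD, h0lt, hplen]
      ·  rw [hagree 0 le_rfl (by omega)]
    have hrowF : ∀ x : Int, a < x → rowFlashes g' x = rowFlashes g x := by
      intro x hx
      rw [rowFlashes, rowFlashes, hg'0, hagree x (by omega) (by omega)]
    have hpre' : ∀ row ∈ g', (PySem.List.pyGetD g' 0 ([] : List Int)).length ≤ row.length := by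
      intro row hrow
      rw [hg'0]
      rw [hg'set] at hrow
      rcases List.mem_or_eq_of_mem_set hrow with h | h
      · exact hpre _ h
      · subst h; rw [hplen]; exact hpre _ hmem
    have hlen' : g'.length = g.length := by simp [hg'set]
    have hrec := ih (a + 1) g' (acc ++ rowFlashes g a) (by rw [hlen']; omega)
      (by rw [hlen']; omega) (by omega) hpre'
    rw [hflash, hrec, List.flatMap_cons, ← List.append_assoc]
    congr 1
    apply List.flatMap_congr
    intro x hx
    exact hrowF x (by have := (PySem.List.mem_pyRange_one.mp hx).1; omega)

-- B's comprehension equals the same flatMap over row indices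
theorem altB_eq (em : List (List Int)) :
    update_all_alt em = (PySem.List.pyRange 0 (em.length : Int) 1).flatMap (rowFlashes em) := by
  have hwidth : (match em with | [] => (0 : Int) | r :: _ => (r.length : Int))
      = ((PySem.List.pyGetD em 0 ([] : List Int)).length : Int) := by
    cases em <;> simp [PySem.List.pyGetD, PySem.List.pyGet?_zero]
  simp only [update_all_alt]
  rw [hwidth, PySem.List.enumerate_eq_map_pyRange em ([] : List Int), List.flatMap_map]
  apply List.flatMap_congr
  intro x hx
  simp [rowFlashes]

-- ===== VERDICT (by name: the statement is the Claim_ definition above) =====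
theorem update_all_spec : Claim_equal_update_all := by
  intro em _ hpre
  unfold Spec_update_all update_all
  have hpre' : ∀ row ∈ em, (PySem.List.pyGetD em 0 ([] : List Int)).length ≤ row.length := by
    intro row hrow
    have := hpre row hrow
    cases em with
    | nil => simp at hrow
    | cons r rs => simpa [PySem.List.pyGetD, PySem.List.pyGet?_zero] using this
  rw [outerA_flash em.length 0 (em.length : Int) em [] (by omega) rfl le_rfl hpre',
    altB_eq, List.nil_append]
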